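-- pv_equiv track=rewrite | github.com/pypi-data/pypi-mirror-403 | packages/gable/gable-0.55.0.tar.gz/gable-0.55.0/gable/cli/helpers/exclude_options.py | _iter_flag_patterns
-- ===== SOURCE A (Python) =====
-- from typing import Any, Dict, Iterable, List, Optional, Set
--
-- def _iter_flag_patterns(flag_value: Optional[object]) -> Iterable[str]:
--     """
--     Accepts:
--       - None
--       - CSV string: "a, b"
--       - list/tuple/set of strings; each element may itself be CSV
--     Yields trimmed, non-empty patterns.
--     """
--     if flag_value is None:
--         return
--     if isinstance(flag_value, str):
--         items = [flag_value]
--     elif isinstance(flag_value, (list, tuple, set)):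
--         items = [str(x) for x in flag_value]
--     else:
--         items = [str(flag_value)]
--     for item in items:
--         for piece in item.split(","):
--             piece = piece.strip()
--             if piece:
--                 yield piece
-- ===== SOURCE B (Python) =====
-- def _iter_flag_patterns(flag_value):
--     """Single-pass character scanner: instead of split(',') + strip() per piece,
--     walk each item once, building the current pattern with leading whitespace
--     skipped and trailing whitespace held back in a pending buffer."""
--     if flag_value is None:
--         return
--     if isinstance(flag_value, str):
--         items = [flag_value]
--     elif isinstance(flag_value, (list, tuple, set)):
--         items = [str(x) for x in flag_value]
--     else:
--         items = [str(flag_value)]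
--     for item in items:
--         cur = []
--         pend = []
--         for ch in item:
--             if ch == ',':
--                 if cur:
--                     yield ''.join(cur)
--                 cur = []
--                 pend = []
--             elif ch.isspace():
--                 if cur:
--                     pend.append(ch)
--             else:
--                 cur.extend(pend)
--                 cur.append(ch)
--                 pend = []
--         if cur:
--             yield ''.join(cur)
-- ===== Notes on version B (the rewrite author's own statement) =====
-- stated objective: alternative
-- what changed: Replaces comma-split plus per-piece strip with a single-pass character scanner that builds each trimmed pattern incrementally (pending-whitespace buffer), emitting a piece whenever a comma separator is met.
import Mathlib
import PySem

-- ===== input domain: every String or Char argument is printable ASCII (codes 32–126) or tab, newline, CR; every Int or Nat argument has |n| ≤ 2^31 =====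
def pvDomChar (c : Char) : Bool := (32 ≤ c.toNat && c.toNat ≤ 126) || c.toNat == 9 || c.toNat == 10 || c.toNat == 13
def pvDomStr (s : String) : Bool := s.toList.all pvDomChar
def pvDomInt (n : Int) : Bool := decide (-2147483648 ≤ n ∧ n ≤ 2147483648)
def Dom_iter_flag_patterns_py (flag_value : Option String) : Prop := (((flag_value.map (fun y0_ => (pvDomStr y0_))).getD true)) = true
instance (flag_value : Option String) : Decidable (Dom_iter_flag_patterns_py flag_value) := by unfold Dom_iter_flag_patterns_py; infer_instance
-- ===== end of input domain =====

-- B replaces A's comma-split-then-strip with a single-pass character scanner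
-- (pending-whitespace buffer); same trimmed non-empty patterns in the same order.


-- ===== PORT A =====
-- A: if None → nothing; a string is one item; for each piece of item.split(","),
-- strip it and yield it when non-empty (under Option String only the None/str branches are live).
def iter_flag_patterns_py (flag_value : Option String) : List String :=
  match flag_value with
  | none => []
  | some s =>
    (PySem.Chars.splitOn s.toList [',']).foldl
      (fun acc piece =>
        let p := PySem.Chars.strip piece
        if p ≠ [] then acc ++ [String.ofList p] else acc) []

-- ===== PORT B =====
-- B: one pass over the characters; `cur` holds the trimmed pattern so far,
-- `pend` holds whitespace seen after `cur` (kept only if `cur` is non-empty).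
def pvScan : List Char → List Char → List Char → List String → List String
  | [], cur, _pend, acc => if cur = [] then acc else acc ++ [String.ofList cur]
  | c :: rest, cur, pend, acc =>
    if c = ',' then
      pvScan rest [] [] (if cur = [] then acc else acc ++ [String.ofList cur])
    else if PySem.Chars.isspace c then
      pvScan rest cur (if cur = [] then [] else pend ++ [c]) acc
    else
      pvScan rest (cur ++ pend ++ [c]) [] acc

def iter_flag_patterns_py_alt (flag_value : Option String) : List String :=
  match flag_value with
  | none => []
  | some s => pvScan s.toList [] [] []

-- ===== PRECONDITION & SPEC =====
def Spec_iter_flag_patterns_py (flag_value : Option String) (out : List String) : Prop := out = iter_flag_patterns_py_alt flag_value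
instance (flag_value : Option String) (out : List String) : Decidable (Spec_iter_flag_patterns_py flag_value out) := by unfold Spec_iter_flag_patterns_py; infer_instance

-- ===== CLAIM (what is proved, stated in full; the proofs are below) =====
def Claim_equal_iter_flag_patterns_py : Prop := ∀ (flag_value : Option String), Dom_iter_flag_patterns_py flag_value → Spec_iter_flag_patterns_py flag_value (iter_flag_patterns_py flag_value)

-- ===== LEMMAS AND PROOFS =====

-- prepend to the head piece
def pvCons (p : List Char) : List (List Char) → List (List Char)
  | [] => [p]
  | h :: t => (p ++ h) :: t

-- simple recursive characterization of splitOn on the single-char separator ','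
def mySplit : List Char → List (List Char)
  | [] => [[]]
  | c :: rest => if c = ',' then [] :: mySplit rest else pvCons [c] (mySplit rest)

theorem mySplit_ne_nil (cs : List Char) : mySplit cs ≠ [] := by
  cases cs with
  | nil => simp [mySplit]
  | cons c rest =>
    simp only [mySplit]
    split
    · simp
    · cases h : mySplit rest <;> simp [pvCons]

theorem pvCons_nil (M : List (List Char)) (h : M ≠ []) : pvCons [] M = M := by
  cases M with
  | nil => exact absurd rfl h
  | cons a t => simp [pvCons]

theorem pvCons_append (a b : List Char) (M : List (List Char)) :
    pvCons (a ++ b) M = pvCons a (pvCons b M) := by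
  cases M <;> simp [pvCons]

theorem splitOn_go_spec (fuel : Nat) (l cur : List Char) (acc : List (List Char))
    (h : l.length < fuel) :
    PySem.Chars.splitOn.go [','] fuel l cur acc = acc.reverse ++ pvCons cur.reverse (mySplit l) := by
  induction fuel generalizing l cur acc with
  | zero => omega
  | succ fuel ih =>
    cases l with
    | nil => simp [PySem.Chars.splitOn.go, mySplit, pvCons]
    | cons c rest =>
      rw [PySem.Chars.splitOn.go]
      by_cases hc : c = ','
      · subst hc
        simp only [List.isPrefixOf, BEq.rfl, Bool.true_and, if_true, List.length_cons,
          List.length_nil, Nat.zero_add, List.drop_succ_cons, List.drop_zero]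
        rw [ih rest [] _ (by simpa using Nat.lt_of_succ_lt_succ (by simpa using h))]
        rw [List.reverse_nil, pvCons_nil _ (mySplit_ne_nil rest)]
        simp [mySplit, pvCons]
      · have hpre : [','].isPrefixOf (c :: rest) = false := by
          simp [List.isPrefixOf]
          exact fun hh => hc hh.symm
        rw [hpre]
        simp only [Bool.false_eq_true, if_false]
        rw [ih rest (c :: cur) acc (by simpa using Nat.lt_of_succ_lt_succ (by simpa using h))]
        simp only [List.reverse_cons, mySplit, hc, if_false, pvCons_append]

theorem splitOn_eq_mySplit (cs : List Char) :
    PySem.Chars.splitOn cs [','] = mySplit cs := by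
  unfold PySem.Chars.splitOn
  rw [splitOn_go_spec _ _ _ _ (by omega)]
  simp [pvCons_nil _ (mySplit_ne_nil cs)]

-- A's fold, abbreviated
def pvAfold (acc : List String) (pieces : List (List Char)) : List String :=
  pieces.foldl
    (fun acc piece =>
      let p := PySem.Chars.strip piece
      if p ≠ [] then acc ++ [String.ofList p] else acc) acc

theorem strip_cons_space (c : Char) (h : PySem.Chars.isspace c = true) (l : List Char) :
    PySem.Chars.strip (c :: l) = PySem.Chars.strip l := by
  simp [PySem.Chars.strip, PySem.Chars.lstrip, h]

theorem lstrip_append_fix (l m : List Char) (hne : l ≠ [])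
    (hl : PySem.Chars.lstrip l = l) : PySem.Chars.lstrip (l ++ m) = l ++ m := by
  cases l with
  | nil => exact absurd rfl hne
  | cons a t =>
    have ha : PySem.Chars.isspace a = false := by
      by_contra hcon
      have ha' : PySem.Chars.isspace a = true := by
        cases hx : PySem.Chars.isspace a
        · exact absurd hx hcon
        · rfl
      have := List.length_dropWhile_le (p := PySem.Chars.isspace) t
      simp [PySem.Chars.lstrip, ha'] at hl
      have : (List.dropWhile PySem.Chars.isspace t).length = t.length + 1 := by rw [hl]; simp
      omega
    simp [PySem.Chars.lstrip, ha]

theorem rstrip_append_nonspace (xs : List Char) (c : Char)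
    (hc : PySem.Chars.isspace c = false) :
    PySem.Chars.rstrip (xs ++ [c]) = xs ++ [c] := by
  simp [PySem.Chars.rstrip, hc]

theorem strip_fixed (cur pend : List Char)
    (hl : PySem.Chars.lstrip (cur ++ pend) = cur ++ pend)
    (hr : PySem.Chars.rstrip cur = cur)
    (hp : pend.all PySem.Chars.isspace = true) :
    PySem.Chars.strip (cur ++ pend) = cur := by
  have hdp : List.dropWhile PySem.Chars.isspace pend.reverse = [] := by
    rw [List.dropWhile_eq_nil_iff]
    intro x hx
    exact (List.all_eq_true.mp hp) x (List.mem_reverse.mp hx)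
  have hdc : List.dropWhile PySem.Chars.isspace cur.reverse = cur.reverse := by
    have := congrArg List.reverse hr
    simpa [PySem.Chars.rstrip] using this
  unfold PySem.Chars.strip
  rw [hl]
  unfold PySem.Chars.rstrip
  rw [List.reverse_append, List.dropWhile_append, hdp]
  simp [hdc]

theorem pvScan_spec (cs : List Char) : ∀ (cur pend : List Char) (acc : List String),
    PySem.Chars.lstrip (cur ++ pend) = cur ++ pend →
    PySem.Chars.rstrip cur = cur →
    pend.all PySem.Chars.isspace = true →
    (cur = [] → pend = []) →
    pvScan cs cur pend acc = pvAfold acc (pvCons (cur ++ pend) (mySplit cs)) := by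
  induction cs with
  | nil =>
    intro cur pend acc hl hr hp hcp
    simp only [pvScan, mySplit, pvCons, List.append_nil, pvAfold, List.foldl_cons, List.foldl_nil]
    rw [strip_fixed cur pend hl hr hp]
    by_cases hc : cur = []
    · simp [hc]
    · simp [hc]
  | cons c rest ih =>
    intro cur pend acc hl hr hp hcp
    by_cases hcomma : c = ','
    · subst hcomma
      simp only [pvScan, if_true]
      rw [ih [] [] _ (by simp [PySem.Chars.lstrip]) (by simp [PySem.Chars.rstrip]) (by simp)
        (fun _ => rfl)]
      rw [List.nil_append, pvCons_nil _ (mySplit_ne_nil rest)]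
      simp only [mySplit, if_true, pvCons, pvAfold, List.foldl_cons]
      rw [List.append_nil, strip_fixed cur pend hl hr hp]
      by_cases hc : cur = []
      · simp [hc]
      · simp [hc]
    · by_cases hsp : PySem.Chars.isspace c = true
      · simp only [pvScan, hcomma, if_false, hsp, if_true]
        by_cases hc : cur = []
        · have hpnil : pend = [] := hcp hc
          subst hc; subst hpnil
          simp only [if_true]
          rw [ih [] [] _ (by simp [PySem.Chars.lstrip]) (by simp [PySem.Chars.rstrip]) (by simp)
            (fun _ => rfl)]
          rw [List.append_nil, pvCons_nil _ (mySplit_ne_nil rest), pvCons_nil _ (mySplit_ne_nil (c :: rest))]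
          simp only [mySplit, hcomma, if_false]
          cases hM : mySplit rest with
          | nil => exact absurd hM (mySplit_ne_nil rest)
          | cons hH hT =>
            simp only [pvCons, pvAfold, List.foldl_cons, List.singleton_append]
            rw [strip_cons_space c hsp]
        · simp only [hc, if_false]
          have hne : cur ++ pend ≠ [] := by
            intro hcon
            exact hc (List.append_eq_nil_iff.mp hcon).1
          rw [ih cur (pend ++ [c]) acc
            (by rw [← List.append_assoc]; exact lstrip_append_fix _ _ hne hl) hr
            (by
              simp only [List.all_append, List.all_cons, List.all_nil, Bool.and_true, hp,
                Bool.true_and]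
              exact hsp)
            (fun hcon => absurd hcon hc)]
          simp only [mySplit, hcomma, if_false, pvCons_append]
      · have hsp' : PySem.Chars.isspace c = false := by
          cases hx : PySem.Chars.isspace c
          · rfl
          · exact absurd hx hsp
        simp only [pvScan, hcomma, if_false, hsp', Bool.false_eq_true]
        rw [ih (cur ++ pend ++ [c]) [] acc
          (by
            rw [List.append_nil]
            by_cases hc : cur = []
            · have : pend = [] := hcp hc
              subst hc; subst this
              simp [PySem.Chars.lstrip, hsp']
            · have hne : cur ++ pend ≠ [] := by
                intro hcon
                exact hc (List.append_eq_nil_iff.mp hcon).1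
              exact lstrip_append_fix _ _ hne hl)
          (rstrip_append_nonspace _ c hsp')
          (by simp)
          (by intro hcon; simp at hcon)]
        simp only [mySplit, hcomma, if_false, pvCons_append, List.append_nil]

-- ===== VERDICT (by name: the statement is the Claim_ definition above) =====
theorem iter_flag_patterns_py_spec : Claim_equal_iter_flag_patterns_py := by
  intro flag_value _
  unfold Spec_iter_flag_patterns_py
  cases flag_value with
  | none => rfl
  | some s =>
    show iter_flag_patterns_py (some s) = iter_flag_patterns_py_alt (some s)
    simp only [iter_flag_patterns_py, iter_flag_patterns_py_alt]
    rw [splitOn_eq_mySplit]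
    rw [pvScan_spec s.toList [] [] [] (by simp [PySem.Chars.lstrip])
      (by simp [PySem.Chars.rstrip]) (by simp) (fun _ => rfl)]
    rw [List.nil_append, pvCons_nil _ (mySplit_ne_nil s.toList)]
    rfl
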